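-- pv_equiv track=rewrite | github.com/arturoornelasb/tibia-bonelord-469-cipher | scripts/core/narrative_translate.py | find_best_overlap
-- ===== SOURCE A (Python) =====
-- def find_best_overlap(fragments):
--     best_score = 0
--     best_i = best_j = -1
--     best_merged = ''
--     for i in range(len(fragments)):
--         for j in range(len(fragments)):
--             if i == j: continue
--             a, b = fragments[i], fragments[j]
--             max_ov = min(len(a), len(b))
--             for ov in range(max_ov, 0, -1):
--                 if a[-ov:] == b[:ov]:
--                     if ov > best_score:
--                         best_score = ov
--                         best_i, best_j = i, j
--                         best_merged = a + b[ov:]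
--                     break
--     return best_score, best_i, best_j, best_merged
-- ===== SOURCE B (Python) =====
-- def _overlap(a, b):
--     # longest k such that a ends with b[:k], via the KMP prefix function of b + sep + a
--     s = b + '\x00' + a
--     pi = [0] * len(s)
--     k = 0
--     for q in range(1, len(s)):
--         while k > 0 and s[q] != s[k]:
--             k = pi[k - 1]
--         if s[q] == s[k]:
--             k += 1
--         pi[q] = k
--     return k
--
-- def find_best_overlap(fragments):
--     best_score = 0
--     best_i = best_j = -1
--     best_merged = ''
--     n = len(fragments)
--     for i in range(n):
--         for j in range(n):
--             if i == j: continue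
--             a, b = fragments[i], fragments[j]
--             ov = _overlap(a, b)
--             if ov > best_score:
--                 best_score = ov
--                 best_i, best_j = i, j
--                 best_merged = a + b[ov:]
--     return best_score, best_i, best_j, best_merged
-- ===== Notes on version B (the rewrite author's own statement) =====
-- stated objective: alternative
-- what changed: Per ordered pair, A tries every candidate overlap length in descending order and compares two freshly built slices each time; B instead computes the longest suffix-of-a/prefix-of-b overlap in a single left-to-right pass as the final value of the KMP prefix function of b + '\x00' + a.
import Mathlib
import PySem

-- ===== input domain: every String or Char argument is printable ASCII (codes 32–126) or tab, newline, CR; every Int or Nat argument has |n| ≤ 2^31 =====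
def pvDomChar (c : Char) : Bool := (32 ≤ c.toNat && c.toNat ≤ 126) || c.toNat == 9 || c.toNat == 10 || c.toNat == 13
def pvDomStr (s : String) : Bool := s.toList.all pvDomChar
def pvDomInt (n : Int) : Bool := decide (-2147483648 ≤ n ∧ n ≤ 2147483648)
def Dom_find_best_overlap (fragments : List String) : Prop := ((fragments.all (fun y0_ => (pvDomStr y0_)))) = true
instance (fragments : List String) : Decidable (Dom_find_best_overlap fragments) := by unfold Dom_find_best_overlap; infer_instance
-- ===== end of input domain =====

-- Alternative algorithm: A scans candidate overlap lengths in descending order comparing slices;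
-- B computes each pair's longest overlap in one pass as the KMP prefix function of b + '\x00' + a.

-- ===== PORT A =====
-- inner 'for ov in range(max_ov, 0, -1): if a[-ov:] == b[:ov]: …; break' loop of A
def pvAInner (a b : String) (i j : Int) : List Int → Int × Int × Int × String → Int × Int × Int × String
  | [], st => st
  | ov :: rest, st =>
    if PySem.Str.slice a (some (-ov)) none = PySem.Str.slice b none (some ov) then
      if ov > st.1 then (ov, i, j, a ++ PySem.Str.slice b (some ov) none) else st
    else pvAInner a b i j rest st

def find_best_overlap (fragments : List String) : Int × Int × Int × String :=
  (PySem.List.pyRange 0 fragments.length).foldl (fun st i =>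
    (PySem.List.pyRange 0 fragments.length).foldl (fun st j =>
      if i = j then st
      else
        let a := PySem.List.pyGetD fragments i ""
        let b := PySem.List.pyGetD fragments j ""
        pvAInner a b i j (PySem.List.pyRange (min (PySem.Str.len a) (PySem.Str.len b)) 0 (-1)) st) st)
    (0, -1, -1, "")

-- ===== PORT B =====
-- 'while k > 0 and s[q] != s[k]: k = pi[k-1]'.  Fuel = k at entry suffices: on every reachable
-- state pi[k-1] < k (proved below), so the fuel never runs out on the states the port reaches.
def pvKmpWhile (s : List Char) (pi : List Nat) (c : Char) : Nat → Nat → Nat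
  | 0, k => k
  | fuel + 1, k => if k > 0 ∧ s.getD k ' ' ≠ c then pvKmpWhile s pi c fuel (pi.getD (k - 1) 0) else k

-- _overlap(a, b): final value of the KMP prefix function of b + '\x00' + a (string handled as its char list)
def pvOverlap (a b : String) : Nat :=
  let s := b.toList ++ '\x00' :: a.toList
  ((PySem.List.pyRange 1 (s.length : Int)).foldl (fun st q =>
      let c := s.getD q.toNat ' '
      let k := pvKmpWhile s st.1 c st.2 st.2
      let k := if c = s.getD k ' ' then k + 1 else k
      (st.1.set q.toNat k, k))
    (List.replicate s.length 0, 0)).2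

def find_best_overlap_alt (fragments : List String) : Int × Int × Int × String :=
  (PySem.List.pyRange 0 fragments.length).foldl (fun st i =>
    (PySem.List.pyRange 0 fragments.length).foldl (fun st j =>
      if i = j then st
      else
        let a := PySem.List.pyGetD fragments i ""
        let b := PySem.List.pyGetD fragments j ""
        let ov : Int := (pvOverlap a b : Int)
        if ov > st.1 then (ov, i, j, a ++ PySem.Str.slice b (some ov) none) else st) st)
    (0, -1, -1, "")

-- ===== PRECONDITION & SPEC =====
def Spec_find_best_overlap (fragments : List String) (out : Int × Int × Int × String) : Prop := out = find_best_overlap_alt fragments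
instance (fragments : List String) (out : Int × Int × Int × String) : Decidable (Spec_find_best_overlap fragments out) := by unfold Spec_find_best_overlap; infer_instance

-- ===== CLAIM (what is proved, stated in full; the proofs are below) =====
def Claim_equal_find_best_overlap : Prop := ∀ (fragments : List String), Dom_find_best_overlap fragments → Spec_find_best_overlap fragments (find_best_overlap fragments)

-- ===== LEMMAS AND PROOFS =====

-- k is a (proper) border of t: a length-k prefix of t that is also a suffix
abbrev pvBrd (t : List Char) (k : Nat) : Prop := k < t.length ∧ t.take k = t.drop (t.length - k)

-- length of the longest border of t
def pvLb (t : List Char) : Nat := Nat.findGreatest (pvBrd t) t.length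

-- ov is a valid overlap: the length-ov suffix of al equals the length-ov prefix of bl
abbrev pvOv (al bl : List Char) (ov : Nat) : Prop :=
  ov ≤ al.length ∧ ov ≤ bl.length ∧ al.drop (al.length - ov) = bl.take ov

-- the maximal overlap
def pvM (al bl : List Char) : Nat := Nat.findGreatest (pvOv al bl) (min al.length bl.length)

lemma pvBrd_zero {t : List Char} (h : t ≠ []) : pvBrd t 0 := by
  constructor
  · exact List.length_pos_iff.mpr h
  · simp

lemma pvBrd_pvLb {t : List Char} (h : t ≠ []) : pvBrd t (pvLb t) :=
  Nat.findGreatest_spec (Nat.zero_le _) (pvBrd_zero h)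

lemma pvLb_ge {t : List Char} {k : Nat} (hk : pvBrd t k) : k ≤ pvLb t :=
  Nat.le_findGreatest (le_of_lt hk.1) hk

lemma pvLb_eq {t : List Char} {k : Nat} (hb : pvBrd t k) (hmax : ∀ m, pvBrd t m → m ≤ k) :
    pvLb t = k := by
  have h1 : k ≤ pvLb t := pvLb_ge hb
  have hne : t ≠ [] := by intro h; subst h; exact absurd hb.1 (by simp)
  have h2 : pvLb t ≤ k := hmax _ (pvBrd_pvLb hne)
  omega

lemma pvLb_lt {t : List Char} (h : t ≠ []) : pvLb t < t.length := (pvBrd_pvLb h).1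

lemma pvLb_singleton (c : Char) : pvLb [c] = 0 := by
  apply pvLb_eq (pvBrd_zero (by simp))
  intro m hm
  have := hm.1
  simp at this
  omega

-- nesting: below a border k2, borders of t and borders of (t.take k2) coincide
lemma pvBrd_take_iff {t : List Char} {k1 k2 : Nat} (h2 : pvBrd t k2) (hlt : k1 < k2) :
    pvBrd (t.take k2) k1 ↔ pvBrd t k1 := by
  have hk2 : k2 < t.length := h2.1
  have hlen : (t.take k2).length = k2 := by rw [List.length_take]; omega
  have e1 : (t.take k2).take k1 = t.take k1 := by
    rw [List.take_take]; congr 1; omega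
  have e2 : (t.take k2).drop ((t.take k2).length - k1) = t.drop (t.length - k1) := by
    rw [hlen, h2.2, List.drop_drop]; congr 1; omega
  constructor
  · rintro ⟨_, he⟩
    refine ⟨by omega, ?_⟩
    rw [← e1, he, e2]
  · rintro ⟨_, he⟩
    refine ⟨by omega, ?_⟩
    rw [e1, e2]; exact he

-- extension: borders of t ++ [c] of positive length
lemma pvBrd_concat_iff {t : List Char} {c : Char} {k : Nat} :
    pvBrd (t ++ [c]) (k + 1) ↔ pvBrd t k ∧ t.getD k ' ' = c := by
  constructor
  · rintro ⟨hl, he⟩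
    have hk : k < t.length := by
      simp only [List.length_append, List.length_cons, List.length_nil] at hl; omega
    have harr : (t ++ [c]).length - (k + 1) = t.length - k := by simp
    rw [harr, List.take_append_of_le_length (by omega),
        List.drop_append_of_le_length (by omega), List.take_succ,
        List.getElem?_eq_getElem hk] at he
    simp only [Option.toList_some] at he
    obtain ⟨h1, h2⟩ := List.append_inj' he (by simp)
    refine ⟨⟨hk, h1⟩, ?_⟩
    rw [List.getD_eq_getElem?_getD, List.getElem?_eq_getElem hk]
    simpa using h2
  · rintro ⟨⟨hk, h1⟩, h2⟩
    refine ⟨by simp only [List.length_append, List.length_cons, List.length_nil]; omega, ?_⟩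
    have harr : (t ++ [c]).length - (k + 1) = t.length - k := by simp
    rw [harr, List.take_append_of_le_length (by omega),
        List.drop_append_of_le_length (by omega), List.take_succ,
        List.getElem?_eq_getElem hk]
    rw [List.getD_eq_getElem?_getD, List.getElem?_eq_getElem hk] at h2
    simp only [Option.getD_some] at h2
    simp only [Option.toList_some]
    rw [h1, h2]

-- separator: borders of bl ++ sep :: al are exactly the overlaps, when sep occurs in neither part
lemma pvBrd_sep_iff {al bl : List Char} {sep : Char} (hna : sep ∉ al) (hnb : sep ∉ bl)
    {k : Nat} : pvBrd (bl ++ sep :: al) k ↔ pvOv al bl k := by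
  have hL : (bl ++ sep :: al).length = bl.length + al.length + 1 := by simp; omega
  have e2 : ∀ hka : k ≤ al.length,
      (bl ++ sep :: al).drop ((bl ++ sep :: al).length - k) = al.drop (al.length - k) := by
    intro hka
    have hsplit : (bl ++ sep :: al).length - k = bl.length + ((al.length - k) + 1) := by
      rw [hL]; omega
    rw [hsplit, ← List.drop_drop, List.drop_left, List.drop_succ_cons]
  constructor
  · rintro ⟨hl, he⟩
    have hkL : k < bl.length + al.length + 1 := by rw [hL] at hl; exact hl
    by_cases hka : k ≤ al.length
    · by_cases hkb : k ≤ bl.length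
      · refine ⟨hka, hkb, ?_⟩
        rw [List.take_append_of_le_length hkb, e2 hka] at he
        exact he.symm
      · -- k > bl.length (and k ≤ al.length): the prefix contains sep, the suffix lies inside al
        exfalso
        replace hkb := Nat.lt_of_not_le hkb
        rw [e2 hka, List.take_append] at he
        have hsep : sep ∈ bl.take k ++ (sep :: al).take (k - bl.length) := by
          cases hn : k - bl.length with
          | zero => omega
          | succ m => simp
        rw [he] at hsep
        exact hna (List.mem_of_mem_drop hsep)
    · -- k > al.length: compare positions k - al.length - 1 (a bl char) and bl.length (sep)
      exfalso
      replace hka := Nat.lt_of_not_le hka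
      set idx := k - al.length - 1 with hidx
      have hidxbl : idx < bl.length := by omega
      have heq : ((bl ++ sep :: al).take k)[idx]? =
          ((bl ++ sep :: al).drop ((bl ++ sep :: al).length - k))[idx]? := by rw [he]
      rw [List.getElem?_take, if_pos (by omega), List.getElem?_drop,
          List.getElem?_append_left (by omega),
          show (bl ++ sep :: al).length - k + idx = bl.length by rw [hL]; omega,
          List.getElem?_append_right (le_refl _), Nat.sub_self] at heq
      rw [List.getElem?_eq_getElem hidxbl] at heq
      simp only [List.getElem?_cons_zero, Option.some.injEq] at heq
      exact hnb (heq ▸ List.getElem_mem hidxbl)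
  · rintro ⟨hka, hkb, he⟩
    refine ⟨by rw [hL]; omega, ?_⟩
    rw [List.take_append_of_le_length hkb, e2 hka]
    exact he.symm

lemma pvOv_zero (al bl : List Char) : pvOv al bl 0 := ⟨Nat.zero_le _, Nat.zero_le _, by simp⟩

lemma pvLb_sep {al bl : List Char} {sep : Char} (hna : sep ∉ al) (hnb : sep ∉ bl) :
    pvLb (bl ++ sep :: al) = pvM al bl := by
  have hM : pvOv al bl (pvM al bl) := Nat.findGreatest_spec (Nat.zero_le _) (pvOv_zero al bl)
  apply pvLb_eq
  · exact (pvBrd_sep_iff hna hnb).mpr hM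
  · intro m hm
    have hOv : pvOv al bl m := (pvBrd_sep_iff hna hnb).mp hm
    exact Nat.le_findGreatest (le_min hOv.1 hOv.2.1) hOv

-- the KMP while loop walks the border chain
lemma pvKmpWhile_spec (s : List Char) (pi : List Nat) (q : Nat) (hq2 : q < s.length)
    (hpi : ∀ j, 1 ≤ j → j ≤ q → pi.getD (j - 1) 0 = pvLb (s.take j)) :
    ∀ fuel k, k ≤ fuel → pvBrd (s.take q) k →
      (∀ k', k < k' → pvBrd (s.take q) k' → s.getD k' ' ' ≠ s.getD q ' ') →
      pvBrd (s.take q) (pvKmpWhile s pi (s.getD q ' ') fuel k) ∧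
      (∀ k', pvKmpWhile s pi (s.getD q ' ') fuel k < k' → pvBrd (s.take q) k' →
        s.getD k' ' ' ≠ s.getD q ' ') ∧
      (pvKmpWhile s pi (s.getD q ' ') fuel k = 0 ∨
        s.getD (pvKmpWhile s pi (s.getD q ' ') fuel k) ' ' = s.getD q ' ') := by
  intro fuel
  induction fuel with
  | zero =>
    intro k hf hb hup
    have hk0 : k = 0 := by omega
    subst hk0
    exact ⟨hb, hup, Or.inl rfl⟩
  | succ fuel ih =>
    intro k hf hb hup
    by_cases hc : k > 0 ∧ s.getD k ' ' ≠ s.getD q ' '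
    · have hstep : pvKmpWhile s pi (s.getD q ' ') (fuel + 1) k =
          pvKmpWhile s pi (s.getD q ' ') fuel (pi.getD (k - 1) 0) := by
        simp only [pvKmpWhile, if_pos hc]
      rw [hstep]
      have hlt : (s.take q).length = q := by rw [List.length_take]; omega
      have hkq : k < q := by have := hb.1; rwa [hlt] at this
      have hpik : pi.getD (k - 1) 0 = pvLb (s.take k) := hpi k hc.1 (by omega)
      have htk : (s.take q).take k = s.take k := by rw [List.take_take]; congr 1; omega
      have hlk : (s.take k).length = k := by rw [List.length_take]; omega
      have hkne : s.take k ≠ [] := by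
        intro h0; rw [h0] at hlk; simp at hlk; omega
      have hk' : pvLb (s.take k) < k := by
        have := pvLb_lt hkne; rwa [hlk] at this
      have hb' : pvBrd (s.take q) (pvLb (s.take k)) := by
        have hiff := pvBrd_take_iff hb hk'
        rw [htk] at hiff
        exact hiff.mp (pvBrd_pvLb hkne)
      have hup' : ∀ k', pvLb (s.take k) < k' → pvBrd (s.take q) k' →
          s.getD k' ' ' ≠ s.getD q ' ' := by
        intro k' hgt hb''
        rcases lt_trichotomy k' k with hlt' | heq' | hgt'
        · exfalso
          have hiff := pvBrd_take_iff hb hlt'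
          rw [htk] at hiff
          have := pvLb_ge (hiff.mpr hb'')
          omega
        · subst heq'; exact hc.2
        · exact hup k' hgt' hb''
      rw [hpik]
      exact ih (pvLb (s.take k)) (by omega) hb' hup'
    · have hstep : pvKmpWhile s pi (s.getD q ' ') (fuel + 1) k = k := by
        simp only [pvKmpWhile, if_neg hc]
      rw [hstep]
      refine ⟨hb, hup, ?_⟩
      by_cases h0 : k = 0
      · exact Or.inl h0
      · right; by_contra hne; exact hc ⟨Nat.pos_of_ne_zero h0, hne⟩

lemma pvGetD_take (s : List Char) (q k : Nat) (h : k < q) :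
    (s.take q).getD k ' ' = s.getD k ' ' := by
  rw [List.getD_eq_getElem?_getD, List.getD_eq_getElem?_getD, List.getElem?_take, if_pos h]

-- one step of the prefix-function loop computes the longest border of the next prefix
lemma pvKmpStep (s : List Char) (pi : List Nat) (q : Nat) (hq1 : 1 ≤ q) (hq2 : q < s.length)
    (hpi : ∀ j, 1 ≤ j → j ≤ q → pi.getD (j - 1) 0 = pvLb (s.take j)) :
    (if s.getD q ' ' = s.getD (pvKmpWhile s pi (s.getD q ' ') (pvLb (s.take q)) (pvLb (s.take q))) ' '
     then pvKmpWhile s pi (s.getD q ' ') (pvLb (s.take q)) (pvLb (s.take q)) + 1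
     else pvKmpWhile s pi (s.getD q ' ') (pvLb (s.take q)) (pvLb (s.take q)))
      = pvLb (s.take (q + 1)) := by
  have hlt : (s.take q).length = q := by rw [List.length_take]; omega
  have hqne : s.take q ≠ [] := by intro h; rw [h] at hlt; simp at hlt; omega
  have hb1 : pvBrd (s.take q) (pvLb (s.take q)) := pvBrd_pvLb hqne
  have hup1 : ∀ k', pvLb (s.take q) < k' → pvBrd (s.take q) k' →
      s.getD k' ' ' ≠ s.getD q ' ' := by
    intro k' hgt hb'
    exfalso
    unfold pvLb at hgt
    exact Nat.findGreatest_is_greatest hgt (le_of_lt hb'.1) hb'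
  obtain ⟨hb0, hup0, hor⟩ := pvKmpWhile_spec s pi q hq2 hpi
    (pvLb (s.take q)) (pvLb (s.take q)) le_rfl hb1 hup1
  set k₀ := pvKmpWhile s pi (s.getD q ' ') (pvLb (s.take q)) (pvLb (s.take q)) with hk₀
  have hk₀q : k₀ < q := by have := hb0.1; rwa [hlt] at this
  have htake : s.take (q + 1) = s.take q ++ [s.getD q ' '] := by
    rw [List.take_succ, List.getElem?_eq_getElem hq2,
        List.getD_eq_getElem?_getD, List.getElem?_eq_getElem hq2]
    rfl
  by_cases hifc : s.getD q ' ' = s.getD k₀ ' '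
  · rw [if_pos hifc, htake]
    refine (pvLb_eq ?_ ?_).symm
    · refine pvBrd_concat_iff.mpr ⟨hb0, ?_⟩
      rw [pvGetD_take s q k₀ hk₀q]
      exact hifc.symm
    · intro m hm
      cases m with
      | zero => omega
      | succ m' =>
        obtain ⟨hbm, hgm⟩ := pvBrd_concat_iff.mp hm
        by_contra hgt
        have hmk : k₀ < m' := by omega
        have hm'q : m' < q := by have := hbm.1; rwa [hlt] at this
        exact hup0 m' hmk hbm (by rw [← pvGetD_take s q m' hm'q, hgm])
  · rw [if_neg hifc, htake]
    have hk00 : k₀ = 0 := by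
      rcases hor with h | h
      · exact h
      · exact absurd h.symm hifc
    refine (pvLb_eq ?_ ?_).symm
    · rw [hk00]
      refine pvBrd_zero ?_
      simp
    · intro m hm
      rw [hk00]
      cases m with
      | zero => exact le_rfl
      | succ m' =>
        exfalso
        obtain ⟨hbm, hgm⟩ := pvBrd_concat_iff.mp hm
        have hm'q : m' < q := by have := hbm.1; rwa [hlt] at this
        by_cases hm'0 : m' = 0
        · subst hm'0
          apply hifc
          have h1 : s.getD 0 ' ' = s.getD q ' ' := by
            rw [← pvGetD_take s q 0 (by omega)]; exact hgm
          rw [hk00]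
          exact h1.symm
        · exact hup0 m' (by omega) hbm (by rw [← pvGetD_take s q m' hm'q, hgm])

-- the prefix-function fold, named for the proofs (identical to the fold inside pvOverlap)
def pvKmpLoop (s : List Char) (m : Nat) : List Nat × Nat :=
  (PySem.List.pyRange 1 (m : Int)).foldl (fun st q =>
      let c := s.getD q.toNat ' '
      let k := pvKmpWhile s st.1 c st.2 st.2
      let k := if c = s.getD k ' ' then k + 1 else k
      (st.1.set q.toNat k, k))
    (List.replicate s.length 0, 0)

lemma pvKmpLoop_inv (s : List Char) : ∀ m, 1 ≤ m → m ≤ s.length →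
    (pvKmpLoop s m).1.length = s.length ∧ (pvKmpLoop s m).2 = pvLb (s.take m) ∧
      ∀ j, 1 ≤ j → j ≤ m → (pvKmpLoop s m).1.getD (j - 1) 0 = pvLb (s.take j) := by
  intro m
  induction m with
  | zero => intro h; omega
  | succ m ih =>
    intro _ hm2
    by_cases hm0 : m = 0
    · subst hm0
      have hrange : PySem.List.pyRange 1 ((1 : Nat) : Int) = [] :=
        PySem.List.pyRange_one_eq_nil (by norm_num)
      have hone : s.take 1 = [s.getD 0 ' '] := by
        cases s with
        | nil => simp at hm2
        | cons c rest => simp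
      unfold pvKmpLoop
      rw [hrange]
      simp only [List.foldl_nil]
      refine ⟨by simp, ?_, ?_⟩
      · rw [hone, pvLb_singleton]
      · intro j hj1 hj2
        have hj : j = 1 := by omega
        subst hj
        rw [hone, pvLb_singleton, List.getD_eq_getElem?_getD, List.getElem?_replicate,
            if_pos (by omega : (0 : Nat) < s.length)]
        rfl
    · have hm1 : 1 ≤ m := by omega
      obtain ⟨hlen, hk, hpi⟩ := ih hm1 (by omega)
      have hunf : pvKmpLoop s (m + 1) =
          (let c := s.getD ((m : Int)).toNat ' '
           let k := pvKmpWhile s (pvKmpLoop s m).1 c (pvKmpLoop s m).2 (pvKmpLoop s m).2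
           let k := if c = s.getD k ' ' then k + 1 else k
           ((pvKmpLoop s m).1.set ((m : Int)).toNat k, k)) := by
        unfold pvKmpLoop
        rw [show ((m + 1 : Nat) : Int) = (m : Int) + 1 by push_cast; ring,
            PySem.List.pyRange_one_succ_right (by exact_mod_cast hm1)]
        rw [List.foldl_append]
        simp only [List.foldl_cons, List.foldl_nil]
      have htn : ((m : Int)).toNat = m := Int.toNat_natCast m
      rw [htn] at hunf
      have hstep := pvKmpStep s (pvKmpLoop s m).1 m hm1 (by omega) hpi
      rw [← hk] at hstep
      constructor
      · rw [hunf]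
        simp only [List.length_set]
        exact hlen
      constructor
      · rw [hunf]
        simp only []
        exact hstep
      · intro j hj1 hj2
        rw [hunf]
        simp only []
        by_cases hjm : j = m + 1
        · subst hjm
          rw [List.getD_eq_getElem?_getD]
          simp only [Nat.add_sub_cancel]
          rw [List.getElem?_set_self (by omega), Option.getD_some]
          exact hstep
        · rw [List.getD_eq_getElem?_getD, List.getElem?_set_ne (by omega),
              ← List.getD_eq_getElem?_getD]
          exact hpi j hj1 (by omega)

lemma pvOverlap_eq_pvLb (a b : String) :
    pvOverlap a b = pvLb (b.toList ++ '\x00' :: a.toList) := by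
  have hrfl : pvOverlap a b = (pvKmpLoop (b.toList ++ '\x00' :: a.toList)
      (b.toList ++ '\x00' :: a.toList).length).2 := rfl
  rw [hrfl]
  have hs : 1 ≤ (b.toList ++ '\x00' :: a.toList).length := by simp; omega
  obtain ⟨_, hk, _⟩ := pvKmpLoop_inv (b.toList ++ '\x00' :: a.toList) _ hs le_rfl
  rw [hk, List.take_length]

-- a[-m:] == b[:m] read on the character lists
lemma pvSliceCond (a b : String) (m : Nat) (hm1 : 0 < m) :
    (PySem.Str.slice a (some (-(m : Int))) none = PySem.Str.slice b none (some (m : Int)))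
      ↔ a.toList.drop (a.toList.length - m) = b.toList.take m := by
  rw [← String.toList_inj, PySem.Str.toList_slice, PySem.Str.toList_slice,
      PySem.Chars.slice_eq_listSlice, PySem.Chars.slice_eq_listSlice,
      PySem.List.slice_from_neg_natCast _ _ hm1, PySem.List.slice_to_natCast]

-- A's descending scan returns the greatest matching overlap (if any beats the score)
lemma pvAInner_eq (a b : String) (i j : Int) (st : Int × Int × Int × String)
    (m : Nat) (hma : m ≤ a.toList.length) (hmb : m ≤ b.toList.length) :
    pvAInner a b i j (PySem.List.pyRange (m : Int) 0 (-1)) st =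
      (let M := Nat.findGreatest (pvOv a.toList b.toList) m
       if 0 < M ∧ (M : Int) > st.1 then ((M : Int), i, j, a ++ PySem.Str.slice b (some (M : Int)) none) else st) := by
  induction m with
  | zero =>
    rw [PySem.List.pyRange_neg_one_eq_nil (by norm_num)]
    simp [pvAInner]
  | succ m ih =>
    rw [PySem.List.pyRange_neg_one_cons (by exact_mod_cast Nat.succ_pos m)]
    simp only [pvAInner]
    by_cases hcond : a.toList.drop (a.toList.length - (m + 1)) = b.toList.take (m + 1)
    · rw [if_pos ((pvSliceCond a b (m + 1) (Nat.succ_pos m)).mpr hcond)]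
      have hP : pvOv a.toList b.toList (m + 1) := ⟨hma, hmb, hcond⟩
      rw [Nat.findGreatest_succ, if_pos hP]
      simp only [Nat.succ_pos, true_and]
    · rw [if_neg (fun h => hcond ((pvSliceCond a b (m + 1) (Nat.succ_pos m)).mp h))]
      rw [show ((m + 1 : Nat) : Int) - 1 = ((m : Nat) : Int) by push_cast; ring]
      rw [ih (by omega) (by omega), Nat.findGreatest_succ,
          if_neg (fun hP : pvOv a.toList b.toList (m + 1) => hcond hP.2.2)]

-- fold congruence under an invariant
lemma pvFoldlCongr {α β : Type} (P : α → Prop) (f g : α → β → α) (l : List β) (st : α)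
    (hst : P st) (hpres : ∀ a b, P a → P (g a b)) (heq : ∀ a b, P a → f a b = g a b) :
    l.foldl f st = l.foldl g st := by
  induction l generalizing st with
  | nil => rfl
  | cons x xs ih =>
    simp only [List.foldl_cons]
    rw [heq _ _ hst]
    exact ih _ (hpres _ _ hst)

lemma pvFoldlPres {α β : Type} (P : α → Prop) (g : α → β → α) (l : List β) (st : α)
    (hst : P st) (hpres : ∀ a b, P a → P (g a b)) : P (l.foldl g st) := by
  induction l generalizing st with
  | nil => exact hst
  | cons x xs ih => exact ih _ (hpres _ _ hst)

-- any element picked out of a Dom-respecting list is '\x00'-free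
lemma pvSepFree (fragments : List String) (hdom : Dom_find_best_overlap fragments) (i : Int) :
    '\x00' ∉ (PySem.List.pyGetD fragments i "").toList := by
  by_cases h : PySem.Raise.InRange fragments.length i
  · have hmem := PySem.List.pyGetD_mem fragments "" h
    unfold Dom_find_best_overlap at hdom
    rw [List.all_eq_true] at hdom
    have hs := hdom _ hmem
    unfold pvDomStr at hs
    rw [List.all_eq_true] at hs
    intro hc
    have := hs _ hc
    simp [pvDomChar] at this
  · rw [PySem.List.pyGetD_of_none fragments i "" ((PySem.List.pyGet?_eq_none_iff fragments i).mpr h)]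
    simp

-- the per-pair step of A equals the per-pair step of B (on states with a nonnegative score)
lemma pvStep_eq (fragments : List String) (hdom : Dom_find_best_overlap fragments)
    (st : Int × Int × Int × String) (hst : 0 ≤ st.1) (i j : Int) :
    (let a := PySem.List.pyGetD fragments i ""
     let b := PySem.List.pyGetD fragments j ""
     pvAInner a b i j (PySem.List.pyRange (min (PySem.Str.len a) (PySem.Str.len b)) 0 (-1)) st) =
    (let a := PySem.List.pyGetD fragments i ""
     let b := PySem.List.pyGetD fragments j ""
     let ov : Int := (pvOverlap a b : Int)
     if ov > st.1 then (ov, i, j, a ++ PySem.Str.slice b (some ov) none) else st) := by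
  have hsa := pvSepFree fragments hdom i
  have hsb := pvSepFree fragments hdom j
  simp only []
  rw [PySem.Str.len_eq, PySem.Str.len_eq, ← Nat.cast_min,
      pvAInner_eq _ _ _ _ _ _ (min_le_left _ _) (min_le_right _ _),
      pvOverlap_eq_pvLb, pvLb_sep hsa hsb]
  simp only [pvM]
  set M := Nat.findGreatest
    (pvOv (PySem.List.pyGetD fragments i "").toList (PySem.List.pyGetD fragments j "").toList)
    (min (PySem.List.pyGetD fragments i "").toList.length
      (PySem.List.pyGetD fragments j "").toList.length) with hMdef
  by_cases hM : 0 < M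
  · simp only [hM, true_and]
  · have hM0 : M = 0 := by omega
    rw [hM0]
    have h1 : ¬ (0 < (0 : Nat) ∧ ((0 : Nat) : Int) > st.1) := by simp
    have h2 : ¬ (((0 : Nat) : Int) > st.1) := by simp; omega
    rw [if_neg h1, if_neg h2]

-- ===== VERDICT (by name: the statement is the Claim_ definition above) =====
theorem find_best_overlap_spec : Claim_equal_find_best_overlap := by
  intro fragments hdom
  unfold Spec_find_best_overlap find_best_overlap find_best_overlap_alt
  have hpresB : ∀ (st : Int × Int × Int × String) (i j : Int), 0 ≤ st.1 →
      0 ≤ (if i = j then st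
           else
             let a := PySem.List.pyGetD fragments i ""
             let b := PySem.List.pyGetD fragments j ""
             let ov : Int := (pvOverlap a b : Int)
             if ov > st.1 then (ov, i, j, a ++ PySem.Str.slice b (some ov) none) else st).1 := by
    intro st i j hst
    by_cases hij : i = j
    · simpa [hij]
    · simp only [if_neg hij]
      split_ifs with h
      · exact Int.natCast_nonneg _
      · exact hst
  refine pvFoldlCongr (fun st : Int × Int × Int × String => 0 ≤ st.1) _ _ _ _ (by norm_num) ?_ ?_
  · intro st i hst
    exact pvFoldlPres (fun st : Int × Int × Int × String => 0 ≤ st.1) _ _ _ hst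
      (fun st' j hst' => hpresB st' i j hst')
  · intro st i hst
    refine pvFoldlCongr (fun st : Int × Int × Int × String => 0 ≤ st.1) _ _ _ _ hst
      (fun st' j hst' => hpresB st' i j hst') ?_
    intro st' j hst'
    by_cases hij : i = j
    · simp [hij]
    · simp only [if_neg hij]
      exact pvStep_eq fragments hdom st' hst' i j
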